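-- pv_equiv track=rewrite | github.com/dsmart978/iowagutterguards | tools/fix_site_content.py | remove_repetitive_city_block
-- ===== SOURCE A (Python) =====
-- REPETITIVE_CITY_MARKER = (
--     "premium gutter guard systems designed to stop clogs, reduce overflow, and keep water moving where it belongs"
-- )
--
-- def remove_repetitive_city_block(html_text: str) -> tuple[str, bool]:
--     if REPETITIVE_CITY_MARKER not in html_text:
--         return html_text, False
--
--     idx = html_text.find(REPETITIVE_CITY_MARKER)
--     start = html_text.rfind("<section", 0, idx)
--     if start == -1:
--         return html_text, False
--
--     i = start
--     depth = 0
--     while i < len(html_text):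
--         if html_text.startswith("<section", i):
--             depth += 1
--         elif html_text.startswith("</section>", i):
--             depth -= 1
--             if depth == 0:
--                 end = i + len("</section>")
--                 return html_text[:start] + html_text[end:], True
--         i += 1
--     return html_text, False
-- ===== SOURCE B (Python) =====
-- REPETITIVE_CITY_MARKER = (
--     "premium gutter guard systems designed to stop clogs, reduce overflow, and keep water moving where it belongs"
-- )
--
-- OPEN_TAG = "<section"
-- CLOSE_TAG = "</section>"
--
--
-- def _tag_tokens(text):
--     """Stage 1: tokenize — list of (end_offset, is_open) for every tag occurrence."""
--     tokens = []
--     i = 0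
--     n = len(text)
--     while i < n:
--         if text.startswith(CLOSE_TAG, i):
--             tokens.append((i + len(CLOSE_TAG), False))
--         elif text.startswith(OPEN_TAG, i):
--             tokens.append((i + len(OPEN_TAG), True))
--         i += 1
--     return tokens
--
--
-- def _balanced_end(tokens):
--     """Stage 2: walk the token stream with a depth counter; return the offset just
--     past the close tag that balances the first open tag, or None."""
--     depth = 0
--     for end, is_open in tokens:
--         if is_open:
--             depth += 1
--         else:
--             depth -= 1
--             if depth == 0:
--                 return end
--     return None
--
--
-- def remove_repetitive_city_block(html_text: str) -> tuple[str, bool]: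
--     if REPETITIVE_CITY_MARKER not in html_text:
--         return html_text, False
--
--     idx = html_text.find(REPETITIVE_CITY_MARKER)
--     start = html_text.rfind("<section", 0, idx)
--     if start == -1:
--         return html_text, False
--
--     tail = html_text[start:]
--     rel = _balanced_end(_tag_tokens(tail))
--     if rel is None:
--         return html_text, False
--     return html_text[:start] + tail[rel:], True
-- ===== Notes on version B (the rewrite author's own statement) =====
-- stated objective: alternative
-- what changed: B is a staged two-pass decomposition: it first tokenizes the tail into an explicit list of (end, is_open) tag tokens, then separately walks that token stream with a depth counter, instead of A's single character-by-character scan that interleaves matching and depth counting.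
import Mathlib
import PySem

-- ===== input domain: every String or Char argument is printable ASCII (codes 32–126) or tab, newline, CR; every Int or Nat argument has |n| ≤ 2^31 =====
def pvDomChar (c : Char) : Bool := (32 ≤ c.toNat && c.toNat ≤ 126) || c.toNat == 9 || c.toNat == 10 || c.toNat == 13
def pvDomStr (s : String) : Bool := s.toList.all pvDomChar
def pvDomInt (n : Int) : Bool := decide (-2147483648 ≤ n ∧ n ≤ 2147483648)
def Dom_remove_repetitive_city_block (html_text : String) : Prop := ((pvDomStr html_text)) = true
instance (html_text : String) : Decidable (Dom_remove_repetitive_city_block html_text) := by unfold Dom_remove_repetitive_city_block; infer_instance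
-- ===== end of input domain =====

-- B decomposes A's single depth-counting character scan into two staged passes:
-- a tokenizer producing the explicit list of tag tokens, then a walk over that list.

def pvMarkerStr : String :=
  "premium gutter guard systems designed to stop clogs, reduce overflow, and keep water moving where it belongs"

def pvOpenTag : String := "<section"
def pvCloseTag : String := "</section>"

-- ===== PORT A =====
-- A's while-loop over the index i, transcribed as structural recursion on the suffix
-- html_text[i:] (startswith(p, i) is startswith of the suffix); it returns the part
-- html_text[end:] when the balanced close is found, none when the loop falls through.
def pvLoopA : List Char → Int → Option (List Char)
  | [], _ => none
  | ch :: rest, depth =>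
    if PySem.Chars.startswith (ch :: rest) pvOpenTag.toList then
      pvLoopA rest (depth + 1)
    else if PySem.Chars.startswith (ch :: rest) pvCloseTag.toList then
      if depth - 1 = 0 then some ((ch :: rest).drop pvCloseTag.toList.length)
      else pvLoopA rest (depth - 1)
    else pvLoopA rest depth

def remove_repetitive_city_block (html_text : String) : String × Bool :=
  if PySem.Str.isIn pvMarkerStr html_text = false then (html_text, false)
  else
    let idx := PySem.Str.find html_text pvMarkerStr
    let start := PySem.Str.rfindFrom html_text pvOpenTag 0 (some idx)
    if start = -1 then (html_text, false)
    else
      match pvLoopA (html_text.toList.drop start.toNat) 0 with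
      | some tail => (String.ofList (html_text.toList.take start.toNat ++ tail), true)
      | none => (html_text, false)

-- ===== PORT B =====
-- Stage 1 of Source B: the token list of every tag occurrence, as (end offset, is_open),
-- built by the same position-by-position scan _tag_tokens performs.
def pvTokens : List Char → Nat → List (Nat × Bool)
  | [], _ => []
  | ch :: rest, i =>
    if PySem.Chars.startswith (ch :: rest) pvCloseTag.toList then
      (i + pvCloseTag.toList.length, false) :: pvTokens rest (i + 1)
    else if PySem.Chars.startswith (ch :: rest) pvOpenTag.toList then
      (i + pvOpenTag.toList.length, true) :: pvTokens rest (i + 1)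
    else pvTokens rest (i + 1)

-- Stage 2 of Source B: _balanced_end, the depth-counting walk over the token list.
def pvWalk : List (Nat × Bool) → Int → Option Nat
  | [], _ => none
  | (e, isOpen) :: rest, depth =>
    if isOpen then pvWalk rest (depth + 1)
    else if depth - 1 = 0 then some e
    else pvWalk rest (depth - 1)

def remove_repetitive_city_block_alt (html_text : String) : String × Bool :=
  if PySem.Str.isIn pvMarkerStr html_text = false then (html_text, false)
  else
    let idx := PySem.Str.find html_text pvMarkerStr
    let start := PySem.Str.rfindFrom html_text pvOpenTag 0 (some idx)
    if start = -1 then (html_text, false)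
    else
      let tail := html_text.toList.drop start.toNat
      match pvWalk (pvTokens tail 0) 0 with
      | some rel => (String.ofList (html_text.toList.take start.toNat ++ tail.drop rel), true)
      | none => (html_text, false)

-- ===== PRECONDITION & SPEC =====
def Spec_remove_repetitive_city_block (html_text : String) (out : String × Bool) : Prop := out = remove_repetitive_city_block_alt html_text
instance (html_text : String) (out : String × Bool) : Decidable (Spec_remove_repetitive_city_block html_text out) := by unfold Spec_remove_repetitive_city_block; infer_instance

-- ===== CLAIM (what is proved, stated in full; the proofs are below) =====
def Claim_equal_remove_repetitive_city_block : Prop := ∀ (html_text : String), Dom_remove_repetitive_city_block html_text → Spec_remove_repetitive_city_block html_text (remove_repetitive_city_block html_text)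

-- ===== LEMMAS AND PROOFS =====

-- "<section" and "</section>" cannot both start at the same position.
theorem pv_not_both (u : List Char)
    (ho : PySem.Chars.startswith u pvOpenTag.toList = true)
    (hc : PySem.Chars.startswith u pvCloseTag.toList = true) : False := by
  obtain ⟨r, hr⟩ := (PySem.Chars.startswith_iff _ _).mp ho
  obtain ⟨q, hq⟩ := (PySem.Chars.startswith_iff _ _).mp hc
  rw [← hr] at hq
  simp [pvOpenTag, pvCloseTag] at hq

-- Shifting the tokenizer's starting offset by one shifts every token end by one.
theorem pvTokens_succ (t : List Char) (i : Nat) :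
    pvTokens t (i + 1) = (pvTokens t i).map (fun p => (p.1 + 1, p.2)) := by
  induction t generalizing i with
  | nil => rfl
  | cons ch rest ih =>
    simp only [pvTokens]
    split_ifs <;> simp [ih (i + 1)] <;> omega

-- Shifting every token end by one shifts the walk's result by one.
theorem pvWalk_shift (toks : List (Nat × Bool)) (d : Int) :
    pvWalk (toks.map fun p => (p.1 + 1, p.2)) d = (pvWalk toks d).map (· + 1) := by
  induction toks generalizing d with
  | nil => rfl
  | cons p rest ih =>
    obtain ⟨e, b⟩ := p
    cases b <;> simp only [List.map_cons, pvWalk]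
    · split_ifs <;> simp [ih]
    · simp [ih]

-- Main lemma: A's interleaved scan equals B's tokenize-then-walk, the walk's
-- returned offset naming the suffix A returns.
theorem pvLoop_eq (t : List Char) (d : Int) :
    pvLoopA t d = Option.map (fun e => t.drop e) (pvWalk (pvTokens t 0) d) := by
  induction t generalizing d with
  | nil => rfl
  | cons ch rest ih =>
    by_cases hc : PySem.Chars.startswith (ch :: rest) pvCloseTag.toList = true
    · have ho : ¬ PySem.Chars.startswith (ch :: rest) pvOpenTag.toList = true :=
        fun h => pv_not_both _ h hc
      simp only [pvLoopA, pvTokens, if_pos hc, if_neg ho, Bool.false_eq_true, if_false,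
        pvWalk, pvTokens_succ rest 0, pvWalk_shift]
      by_cases hd : d - 1 = 0
      · simp [hd]
      · simp only [if_neg hd, ih (d - 1), Option.map_map]
        cases pvWalk (pvTokens rest 0) (d - 1) <;> simp
    · simp only [pvLoopA, pvTokens, if_neg hc,
        pvTokens_succ rest 0]
      by_cases ho : PySem.Chars.startswith (ch :: rest) pvOpenTag.toList = true
      · simp only [if_pos ho, pvWalk, pvWalk_shift, ih (d + 1), Option.map_map, if_true]
        cases pvWalk (pvTokens rest 0) (d + 1) <;> simp
      · simp only [if_neg ho, pvWalk_shift, ih d,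
          Option.map_map]
        cases pvWalk (pvTokens rest 0) d <;> simp

-- ===== VERDICT (by name: the statement is the Claim_ definition above) =====
theorem remove_repetitive_city_block_spec : Claim_equal_remove_repetitive_city_block := by
  intro s _
  unfold Spec_remove_repetitive_city_block
  simp only [remove_repetitive_city_block, remove_repetitive_city_block_alt, pvLoop_eq]
  cases pvWalk (pvTokens (s.toList.drop
      (PySem.Str.rfindFrom s pvOpenTag 0 (some (PySem.Str.find s pvMarkerStr))).toNat) 0) 0 <;>
    simp [List.drop_drop]
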